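-- pv_equiv track=rewrite | github.com/babissal/filetomd | src/fileconverter/converters/xlsx.py | _trim_empty_rows
-- ===== SOURCE A (Python) =====
-- def _trim_empty_rows(rows: list[tuple]) -> list[tuple]:
--     """Remove completely empty rows from start and end."""
--     # Filter out completely empty rows
--     non_empty_rows = [
--         row for row in rows
--         if any(cell is not None and str(cell).strip() for cell in row)
--     ]
--
--     if not non_empty_rows:
--         return []
--
--     # Find max column width (trim empty columns from right)
--     max_col = 0
--     for row in non_empty_rows:
--         for i, cell in enumerate(row):
--             if cell is not None and str(cell).strip():
--                 max_col = max(max_col, i + 1)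
--
--     # Trim columns
--     return [row[:max_col] for row in non_empty_rows]
-- ===== SOURCE B (Python) =====
-- def _trim_empty_rows(rows: list[tuple]) -> list[tuple]:
--     """Remove completely empty rows and trailing empty columns (single pass)."""
--     kept = []
--     max_col = 0
--     for row in rows:
--         w = 0
--         for i in range(len(row) - 1, -1, -1):
--             cell = row[i]
--             if cell is not None and str(cell).strip():
--                 w = i + 1
--                 break
--         if w:
--             kept.append(row)
--             if w > max_col:
--                 max_col = w
--     return [row[:max_col] for row in kept]
-- ===== Notes on version B (the rewrite author's own statement) =====
-- stated objective: alternative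
-- what changed: Fuses A's three passes (filter, full left-to-right enumerate scan for max width, slice) into one pass that scans each row right-to-left with an early break to get its non-empty width, dropping empty rows and keeping a running maximum, then slices once.
import Mathlib
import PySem

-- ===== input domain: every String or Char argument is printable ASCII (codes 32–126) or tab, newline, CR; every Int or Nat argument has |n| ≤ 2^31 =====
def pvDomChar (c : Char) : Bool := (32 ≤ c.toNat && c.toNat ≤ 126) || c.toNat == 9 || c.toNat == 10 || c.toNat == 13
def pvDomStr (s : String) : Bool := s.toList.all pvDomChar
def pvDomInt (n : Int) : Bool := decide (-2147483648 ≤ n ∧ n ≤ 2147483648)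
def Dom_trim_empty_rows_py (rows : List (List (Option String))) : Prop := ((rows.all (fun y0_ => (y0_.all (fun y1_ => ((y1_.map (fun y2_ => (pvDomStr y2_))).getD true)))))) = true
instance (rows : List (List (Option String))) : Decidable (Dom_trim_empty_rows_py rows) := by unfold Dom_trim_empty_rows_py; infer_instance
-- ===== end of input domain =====

-- B fuses A's three passes into one pass per row, scanning right-to-left with an early break; same result, stated for the return value only.

-- ===== PORT A =====
-- `cell is not None and str(cell).strip()` (truthiness of the stripped string)
def pvCellNonEmpty (c : Option String) : Bool :=
  match c with
  | none => false
  | some s => !(PySem.Str.strip s == "")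

-- `enumerate(row)` starting at k
def pvEnumFrom (k : Nat) : List (Option String) → List (Nat × Option String)
  | [] => []
  | x :: xs => (k, x) :: pvEnumFrom (k + 1) xs

def trim_empty_rows_py (rows : List (List (Option String))) : List (List (Option String)) :=
  let non_empty_rows := rows.filter (fun row => row.any pvCellNonEmpty)
  if non_empty_rows = [] then []
  else
    let max_col := non_empty_rows.foldl
      (fun m row => (pvEnumFrom 0 row).foldl
        (fun m ic => if pvCellNonEmpty ic.2 then max m (ic.1 + 1) else m) m) 0
    non_empty_rows.map (fun row => row.take max_col)

-- ===== PORT B =====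
-- right-to-left scan with early break: width of the row = last non-empty index + 1
def pvScanBack : List (Option String) → Nat
  | [] => 0
  | c :: rest => if pvCellNonEmpty c then rest.length + 1 else pvScanBack rest

def trim_empty_rows_py_alt (rows : List (List (Option String))) : List (List (Option String)) :=
  let acc := rows.foldl
    (fun (acc : List (List (Option String)) × Nat) row =>
      let w := pvScanBack row.reverse
      if w ≠ 0 then (acc.1 ++ [row], max acc.2 w) else acc)
    ([], 0)
  acc.1.map (fun row => row.take acc.2)

-- ===== PRECONDITION & SPEC =====
def Spec_trim_empty_rows_py (rows : List (List (Option String))) (out : List (List (Option String))) : Prop := out = trim_empty_rows_py_alt rows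
instance (rows : List (List (Option String))) (out : List (List (Option String))) : Decidable (Spec_trim_empty_rows_py rows out) := by unfold Spec_trim_empty_rows_py; infer_instance

-- ===== CLAIM (what is proved, stated in full; the proofs are below) =====
def Claim_equal_trim_empty_rows_py : Prop := ∀ (rows : List (List (Option String))), Dom_trim_empty_rows_py rows → Spec_trim_empty_rows_py rows (trim_empty_rows_py rows)

-- ===== LEMMAS AND PROOFS =====

-- W k row = max (i+1) over non-empty cells at absolute indices starting at k (0 if none)
def pvW (k : Nat) : List (Option String) → Nat
  | [] => 0
  | c :: rest => if pvCellNonEmpty c then max (k + 1) (pvW (k + 1) rest) else pvW (k + 1) rest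

theorem pvW_le (k : Nat) (row : List (Option String)) : pvW k row ≤ k + row.length := by
  induction row generalizing k with
  | nil => simp [pvW]
  | cons c rest ih =>
    simp only [pvW, List.length_cons]
    split
    · exact max_le (by omega) (le_trans (ih (k+1)) (by omega))
    · exact le_trans (ih (k+1)) (by omega)

theorem pvEnum_fold_eq (row : List (Option String)) (k m : Nat) :
    (pvEnumFrom k row).foldl
      (fun m ic => if pvCellNonEmpty ic.2 then max m (ic.1 + 1) else m) m
      = max m (pvW k row) := by
  induction row generalizing k m with
  | nil => simp [pvEnumFrom, pvW]
  | cons c rest ih =>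
    simp only [pvEnumFrom, List.foldl_cons, pvW]
    by_cases h : pvCellNonEmpty c
    · simp only [h, if_pos, ih]
      omega
    · simp [h, ih]

theorem pvW_append (k : Nat) (xs : List (Option String)) (c : Option String) :
    pvW k (xs ++ [c]) = if pvCellNonEmpty c then k + xs.length + 1 else pvW k xs := by
  induction xs generalizing k with
  | nil => simp [pvW]
  | cons x xs ih =>
    simp only [List.cons_append, pvW, ih, List.length_cons]
    by_cases hc : pvCellNonEmpty c
    · by_cases hx : pvCellNonEmpty x
      · simp only [hc, hx, if_pos]
        have := pvW_le (k + 1) xs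
        omega
      · simp [hc, hx]
        omega
    · simp [hc]

theorem pvScanBack_eq (row : List (Option String)) : pvScanBack row.reverse = pvW 0 row := by
  induction row using List.reverseRecOn with
  | nil => simp [pvScanBack, pvW]
  | append_singleton xs c ih =>
    rw [List.reverse_append]
    simp only [List.reverse_singleton, List.singleton_append, pvScanBack, pvW_append,
      List.length_reverse, ih]
    split <;> omega

theorem pvW_eq_zero_iff (k : Nat) (row : List (Option String)) :
    pvW k row = 0 ↔ row.any pvCellNonEmpty = false := by
  induction row generalizing k with
  | nil => simp [pvW]
  | cons c rest ih =>
    simp only [pvW, List.any_cons, Bool.or_eq_false_iff]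
    by_cases h : pvCellNonEmpty c
    · simp [h]
    · simp [h, ih]

-- the B fold computes (filtered rows appended to acc.1, running max of widths from acc.2)
theorem pvFoldB (rows : List (List (Option String))) (acc : List (List (Option String)) × Nat) :
    rows.foldl
      (fun (acc : List (List (Option String)) × Nat) row =>
        let w := pvScanBack row.reverse
        if w ≠ 0 then (acc.1 ++ [row], max acc.2 w) else acc) acc
    = (acc.1 ++ rows.filter (fun row => row.any pvCellNonEmpty),
       rows.foldl (fun m row => max m (pvW 0 row)) acc.2) := by
  induction rows generalizing acc with
  | nil => simp
  | cons r rs ih =>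
    rw [List.foldl_cons, List.foldl_cons, List.filter_cons]
    by_cases h : r.any pvCellNonEmpty
    · have hw : pvScanBack r.reverse ≠ 0 := by
        rw [pvScanBack_eq]
        intro h0
        rw [pvW_eq_zero_iff] at h0
        simp [h0] at h
      have hstep : (let w := pvScanBack r.reverse
          if w ≠ 0 then (acc.1 ++ [r], max acc.2 w) else acc)
          = (acc.1 ++ [r], max acc.2 (pvScanBack r.reverse)) := if_pos hw
      rw [hstep, ih]
      simp [h, pvScanBack_eq]
    · have hw : pvScanBack r.reverse = 0 := by
        rw [pvScanBack_eq, pvW_eq_zero_iff]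
        simpa using h
      have h0 : pvW 0 r = 0 := by rw [← pvScanBack_eq, hw]
      have hstep : (let w := pvScanBack r.reverse
          if w ≠ 0 then (acc.1 ++ [r], max acc.2 w) else acc)
          = acc := if_neg (by simp [hw])
      rw [hstep, ih]
      simp [h, h0]

-- A's max fold over the filtered rows equals the fold over all rows (empty rows contribute nothing)
theorem pvFoldA (rows : List (List (Option String))) (m : Nat) :
    (rows.filter (fun row => row.any pvCellNonEmpty)).foldl (fun m row => max m (pvW 0 row)) m
      = rows.foldl (fun m row => max m (pvW 0 row)) m := by
  induction rows generalizing m with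
  | nil => rfl
  | cons r rs ih =>
    simp only [List.filter_cons, List.foldl_cons]
    by_cases h : r.any pvCellNonEmpty
    · simp [h, ih]
    · have : pvW 0 r = 0 := (pvW_eq_zero_iff 0 r).mpr (by simpa using h)
      simp [h, this, ih]

-- ===== VERDICT (by name: the statement is the Claim_ definition above) =====
theorem trim_empty_rows_py_spec : Claim_equal_trim_empty_rows_py := by
  intro rows _
  unfold Spec_trim_empty_rows_py trim_empty_rows_py trim_empty_rows_py_alt
  simp only [pvFoldB, List.nil_append]
  by_cases h : rows.filter (fun row => row.any pvCellNonEmpty) = []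
  · simp [h]
  · simp only [if_neg h, pvEnum_fold_eq, pvFoldA]
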